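-- pv_equiv track=rewrite | github.com/paiml/depyler | examples/hard_db_hash_index.py | rehash
-- ===== SOURCE A (Python) =====
-- from typing import List, Tuple
--
-- def hash_key(key: int, num_buckets: int) -> int:
--     h: int = ((key * 0x5BD1E995) ^ (key >> 13)) & 0xFFFFFFFF
--     return h % num_buckets
--
-- def create_index(num_buckets: int) -> List[List[int]]:
--     buckets: List[List[int]] = []
--     for i in range(num_buckets):
--         buckets.append([])
--     return buckets
--
-- def index_insert(buckets: List[List[int]], key: int, value: int) -> List[List[int]]:
--     idx: int = hash_key(key, len(buckets))
--     new_buckets: List[List[int]] = []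
--     for i in range(len(buckets)):
--         nb: List[int] = []
--         for v in buckets[i]:
--             nb.append(v)
--         if i == idx:
--             nb.append(key)
--             nb.append(value)
--         new_buckets.append(nb)
--     return new_buckets
--
-- def rehash(buckets: List[List[int]], new_size: int) -> List[List[int]]:
--     new_buckets: List[List[int]] = create_index(new_size)
--     for b in buckets:
--         i: int = 0
--         while i + 1 < len(b):
--             new_buckets = index_insert(new_buckets, b[i], b[i + 1])
--             i = i + 2
--     return new_buckets
-- ===== SOURCE B (Python) =====
-- def hash_key(key: int, num_buckets: int) -> int:
--     h: int = ((key * 0x5BD1E995) ^ (key >> 13)) & 0xFFFFFFFF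
--     return h % num_buckets
--
-- def rehash(buckets, new_size):
--     new_buckets = [[] for _ in range(new_size)]
--     for b in buckets:
--         for i in range(0, len(b) - 1, 2):
--             idx = hash_key(b[i], new_size)
--             new_buckets[idx].append(b[i])
--             new_buckets[idx].append(b[i + 1])
--     return new_buckets
-- ===== Notes on version B (the rewrite author's own statement) =====
-- stated objective: faster
-- what changed: B appends each key/value pair directly into its hash bucket (one in-place bucket update per pair) instead of A's rebuilding the entire bucket array, copying every bucket, on every single insert.
-- outside the precondition, e.g. on rehash([[1, 2]], 0): A raises ZeroDivisionError, B raises ZeroDivisionError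
import Mathlib
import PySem

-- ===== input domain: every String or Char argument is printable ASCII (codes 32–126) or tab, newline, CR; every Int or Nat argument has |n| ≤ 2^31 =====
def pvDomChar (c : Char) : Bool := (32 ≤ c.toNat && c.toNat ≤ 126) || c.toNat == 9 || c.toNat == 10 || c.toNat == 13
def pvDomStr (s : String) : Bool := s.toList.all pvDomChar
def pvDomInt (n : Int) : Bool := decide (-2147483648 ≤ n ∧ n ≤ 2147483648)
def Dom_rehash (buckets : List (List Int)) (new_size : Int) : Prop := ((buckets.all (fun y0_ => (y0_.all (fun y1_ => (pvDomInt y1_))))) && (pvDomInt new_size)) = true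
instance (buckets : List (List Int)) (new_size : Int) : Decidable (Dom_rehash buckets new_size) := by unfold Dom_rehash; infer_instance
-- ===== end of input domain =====

-- B appends each key/value pair directly into its target bucket (one in-place
-- update per pair) instead of A's rebuilding of the whole bucket array on every
-- insert; measured faster (asymptotic: O(pairs) updates vs O(pairs × buckets) copying).

-- helper shared by both ports: both Pythons contain the identical hash_key
def pvHashKey (key num_buckets : Int) : Int :=
  PySem.Int.mod
    (PySem.Int.band (PySem.Int.bxor (key * 0x5BD1E995) (key >>> (13 : Nat))) 0xFFFFFFFF)
    num_buckets

-- ===== PORT A =====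
def pvCreateIndex (num_buckets : Int) : List (List Int) :=
  (PySem.List.pyRange 0 num_buckets 1).foldl (fun acc _ => acc ++ [([] : List Int)]) []

def pvIndexInsert (buckets : List (List Int)) (key value : Int) : List (List Int) :=
  let idx := pvHashKey key (buckets.length : Int)
  (PySem.List.pyRange 0 (buckets.length : Int) 1).foldl
    (fun new_buckets i =>
      let nb := (PySem.List.pyGetD buckets i []).foldl (fun nb v => nb ++ [v]) []
      let nb := if i == idx then nb ++ [key] ++ [value] else nb
      new_buckets ++ [nb]) []

-- the 'while i + 1 < len(b)' loop of A's rehash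
def pvPairLoop (b : List Int) (new_buckets : List (List Int)) (i : Int) : List (List Int) :=
  if h : i + 1 < (b.length : Int) then
    pvPairLoop b (pvIndexInsert new_buckets (PySem.List.pyGetD b i 0) (PySem.List.pyGetD b (i + 1) 0)) (i + 2)
  else new_buckets
termination_by ((b.length : Int) + 1 - i).toNat
decreasing_by omega

def rehash (buckets : List (List Int)) (new_size : Int) : List (List Int) :=
  buckets.foldl (fun new_buckets b => pvPairLoop b new_buckets 0) (pvCreateIndex new_size)

-- ===== PORT B =====
-- body of B's inner 'for i in range(0, len(b) - 1, 2)' loop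
def pvBStep (new_size : Int) (b : List Int) (new_buckets : List (List Int)) (i : Int) : List (List Int) :=
  let k := PySem.List.pyGetD b i 0
  let v := PySem.List.pyGetD b (i + 1) 0
  let idx := pvHashKey k new_size
  let nbs := PySem.List.pySetD new_buckets idx (PySem.List.pyGetD new_buckets idx [] ++ [k])
  PySem.List.pySetD nbs idx (PySem.List.pyGetD nbs idx [] ++ [v])

def rehash_alt (buckets : List (List Int)) (new_size : Int) : List (List Int) :=
  buckets.foldl
    (fun new_buckets b =>
      (PySem.List.pyRange 0 ((b.length : Int) - 1) 2).foldl (pvBStep new_size b) new_buckets)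
    ((PySem.List.pyRange 0 new_size 1).map (fun _ => ([] : List Int)))

-- ===== PRECONDITION & SPEC =====
-- Pre_ excludes exactly the inputs on which A raises: new_size ≤ 0 together with a
-- bucket containing a pair makes A call hash_key with num_buckets = 0 (ZeroDivisionError).
def Pre_rehash (buckets : List (List Int)) (new_size : Int) : Prop :=
  0 < new_size ∨ ∀ b ∈ buckets, b.length < 2
instance (buckets : List (List Int)) (new_size : Int) : Decidable (Pre_rehash buckets new_size) := by unfold Pre_rehash; infer_instance

def pvWitness_rehash : List (List Int) × Int := ([[1, 2], [3, 4, 5]], 3)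

def Spec_rehash (buckets : List (List Int)) (new_size : Int) (out : List (List Int)) : Prop := out = rehash_alt buckets new_size
instance (buckets : List (List Int)) (new_size : Int) (out : List (List Int)) : Decidable (Spec_rehash buckets new_size out) := by unfold Spec_rehash; infer_instance

-- ===== CLAIM (what is proved, stated in full; the proofs are below) =====
def Claim_equal_rehash : Prop := ∀ (buckets : List (List Int)) (new_size : Int), Dom_rehash buckets new_size → Pre_rehash buckets new_size → Spec_rehash buckets new_size (rehash buckets new_size)

-- ===== LEMMAS AND PROOFS =====

lemma pvRange_two_nil (a b : Int) (h : b ≤ a) : PySem.List.pyRange a b 2 = [] := by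
  rw [PySem.List.pyRange_of_pos a b (by norm_num)]
  simp [show ¬ a < b by omega]

lemma pvRange_two_cons (a b : Int) (h : a < b) :
    PySem.List.pyRange a b 2 = a :: PySem.List.pyRange (a + 2) b 2 := by
  rw [PySem.List.pyRange_of_pos a b (by norm_num),
      PySem.List.pyRange_of_pos (a + 2) b (by norm_num)]
  have hN : (if a < b then ((b - a + 2 - 1) / 2).toNat else 0)
      = (if a + 2 < b then ((b - (a + 2) + 2 - 1) / 2).toNat else 0) + 1 := by
    split_ifs <;> omega
  rw [hN, List.range_succ_eq_map]
  simp only [List.map_cons, List.map_map]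
  congr 1
  · norm_num
  apply List.map_congr_left
  intro k _
  simp only [Function.comp_apply]
  push_cast
  ring

lemma pvCreateIndex_eq (n : Int) :
    pvCreateIndex n = (PySem.List.pyRange 0 n 1).map (fun _ => ([] : List Int)) := by
  unfold pvCreateIndex
  rw [PySem.List.foldl_append_singleton_eq_map (f := fun _ => ([] : List Int))]
  simp

lemma pvLength_init (n : Int) :
    ((PySem.List.pyRange 0 n 1).map (fun _ => ([] : List Int))).length = n.toNat := by
  simp [PySem.List.length_pyRange_one]

-- canonical form of one insert: replace the target bucket by itself with the pair appended
lemma pvIndexInsert_eq (nbs : List (List Int)) (k v : Int) (hpos : 0 < nbs.length) :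
    pvIndexInsert nbs k v =
      nbs.set (pvHashKey k (nbs.length : Int)).toNat
        (nbs.getD (pvHashKey k (nbs.length : Int)).toNat [] ++ [k] ++ [v]) := by
  have hlt : pvHashKey k (nbs.length : Int) < (nbs.length : Int) :=
    PySem.Int.mod_lt _ (by exact_mod_cast hpos)
  have hnn : 0 ≤ pvHashKey k (nbs.length : Int) :=
    PySem.Int.mod_nonneg _ (by exact_mod_cast hpos)
  unfold pvIndexInsert
  simp only [PySem.List.foldl_append_singleton_eq_self, List.nil_append]
  rw [PySem.List.foldl_append_singleton_eq_map
    (f := fun i => if i == pvHashKey k (nbs.length : Int)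
      then PySem.List.pyGetD nbs i [] ++ [k] ++ [v] else PySem.List.pyGetD nbs i [])]
  apply List.ext_getElem
  · simp [PySem.List.length_pyRange_one]
  · intro j h1 h2
    have hj : j < nbs.length := by
      simpa [PySem.List.length_pyRange_one] using h1
    simp only [List.nil_append] at h1 ⊢
    rw [List.getElem_map, PySem.List.getElem_pyRange_one, List.getElem_set]
    have hget : PySem.List.pyGetD nbs (0 + (j : Int)) [] = nbs[j] := by
      rw [PySem.List.pyGetD_eq_getElem nbs [] (by omega) (by omega)]
      congr 1; omega
    by_cases hcase : j = (pvHashKey k (nbs.length : Int)).toNat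
    · subst hcase
      have hbeq : ((0 + ((pvHashKey k (nbs.length : Int)).toNat : Int))
          == pvHashKey k (nbs.length : Int)) = true := by simp; omega
      rw [hbeq, if_pos rfl, if_pos rfl, hget, List.getD_eq_getElem _ _ (by omega)]
    · have hbeq : ((0 + (j : Int)) == pvHashKey k (nbs.length : Int)) = false := by
        simp; omega
      rw [hbeq, if_neg (by simp), if_neg (fun hh => hcase hh.symm)]
      exact hget

-- canonical form of one step of B's inner loop
lemma pvBStep_eq (new_size : Int) (b : List Int) (nbs : List (List Int)) (i : Int)
    (hpos : 0 < new_size) (hlen : (nbs.length : Int) = new_size) :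
    pvBStep new_size b nbs i =
      nbs.set (pvHashKey (PySem.List.pyGetD b i 0) new_size).toNat
        (nbs.getD (pvHashKey (PySem.List.pyGetD b i 0) new_size).toNat []
          ++ [PySem.List.pyGetD b i 0] ++ [PySem.List.pyGetD b (i + 1) 0]) := by
  simp only [pvBStep]
  set k := PySem.List.pyGetD b i 0 with hk
  set idx := pvHashKey k new_size with hidx
  have hnn : 0 ≤ idx := PySem.Int.mod_nonneg _ hpos
  have hlt : idx < new_size := PySem.Int.mod_lt _ hpos
  have hltn : idx.toNat < nbs.length := by omega
  have h1 : PySem.List.pySetD nbs idx (PySem.List.pyGetD nbs idx [] ++ [k])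
      = nbs.set idx.toNat (nbs.getD idx.toNat [] ++ [k]) := by
    rw [PySem.List.pySetD_of_nonneg _ _ hnn,
        PySem.List.pyGetD_eq_getElem _ _ hnn (by omega),
        List.getD_eq_getElem _ _ hltn]
  rw [h1]
  rw [PySem.List.pyGetD_eq_getElem _ _ hnn (by simp [List.length_set]; omega)]
  rw [List.getElem_set_self, PySem.List.pySetD_of_nonneg _ _ hnn, List.set_set]

lemma pvBStep_length (new_size : Int) (b : List Int) (nbs : List (List Int)) (i : Int) :
    (pvBStep new_size b nbs i).length = nbs.length := by
  simp [pvBStep, PySem.List.length_pySetD]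

lemma pvFoldlBStep_length (new_size : Int) (b : List Int) (l : List Int) :
    ∀ nbs : List (List Int), (l.foldl (pvBStep new_size b) nbs).length = nbs.length := by
  induction l with
  | nil => intro nbs; rfl
  | cons x t ih => intro nbs; rw [List.foldl_cons, ih, pvBStep_length]

-- A's while loop over the pairs of b equals B's inner for loop
lemma pvPairLoop_eq (new_size : Int) (b : List Int) (hpos : 0 < new_size) :
    ∀ (nbs : List (List Int)) (i : Int), 0 ≤ i → (nbs.length : Int) = new_size →
      pvPairLoop b nbs i =
        (PySem.List.pyRange i ((b.length : Int) - 1) 2).foldl (pvBStep new_size b) nbs := by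
  intro nbs i
  induction nbs, i using pvPairLoop.induct b with
  | case1 nbs i h ih =>
    intro h0 hlen
    rw [pvPairLoop, dif_pos h]
    rw [pvRange_two_cons i ((b.length : Int) - 1) (by omega), List.foldl_cons]
    have hstep : pvIndexInsert nbs (PySem.List.pyGetD b i 0) (PySem.List.pyGetD b (i + 1) 0)
        = pvBStep new_size b nbs i := by
      rw [pvBStep_eq new_size b nbs i hpos hlen, pvIndexInsert_eq _ _ _ (by omega), hlen]
    rw [← hstep]
    exact ih (by omega) (by rw [hstep, pvBStep_length]; exact hlen)
  | case2 nbs i h =>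
    intro h0 hlen
    rw [pvPairLoop, dif_neg h, pvRange_two_nil _ _ (by omega)]
    rfl

-- fold congruence under a state invariant
lemma pvFoldl_congr_inv {σ α : Type} (P : σ → Prop) (f g : σ → α → σ) :
    ∀ (l : List α) (s : σ), P s → (∀ t a, a ∈ l → P t → f t a = g t a) →
      (∀ t a, P t → P (g t a)) → l.foldl f s = l.foldl g s := by
  intro l
  induction l with
  | nil => intro s _ _ _; rfl
  | cons x t ih =>
    intro s hs hfg hP
    rw [List.foldl_cons, List.foldl_cons, hfg s x (by simp) hs]
    exact ih _ (hP s x hs) (fun t' a ha => hfg t' a (by simp [ha])) hP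

-- ===== VERDICT (by name: the statement is the Claim_ definition above) =====
theorem rehash_spec : Claim_equal_rehash := by
  intro buckets new_size _ hpre
  unfold Spec_rehash rehash rehash_alt
  rw [pvCreateIndex_eq]
  rcases hpre with hpos | hsmall
  · apply pvFoldl_congr_inv (fun nbs => (nbs.length : Int) = new_size)
    · have := pvLength_init new_size
      rw [this]; omega
    · intro nbs b _ hlen
      exact pvPairLoop_eq new_size b hpos nbs 0 (by omega) hlen
    · intro nbs b hlen
      rw [pvFoldlBStep_length]; exact hlen
  · apply PySem.List.foldl_congr_mem'
    intro b hb nbs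
    have hlt : b.length < 2 := hsmall b hb
    rw [pvPairLoop, dif_neg (by omega),
        pvRange_two_nil _ _ (by omega)]
    rfl
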